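-- pv_equiv track=rewrite | github.com/MK-Lee13/Algorithm-Study | Programmers/level_2/52_find_the_number_of_decimals_in_k_number.py | get_split_notation_str
-- ===== SOURCE A (Python) =====
-- def get_split_notation_str(notation_str):
--     split_notation_str = []
--     cache_str = ""
--     for n_str in notation_str:
--         if n_str == "0":
--             if cache_str != "":
--                 split_notation_str.append(cache_str)
--                 cache_str = ""
--             split_notation_str.append(n_str)
--         else:
--             cache_str += n_str
--     if cache_str != "":
--         split_notation_str.append(cache_str)
--     return split_notation_str
-- ===== SOURCE B (Python) =====
-- def get_split_notation_str(notation_str):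
--     out = []
--     i = 0
--     n = len(notation_str)
--     while i < n:
--         if notation_str[i] == "0":
--             out.append("0")
--             i += 1
--         else:
--             j = i
--             while j < n and notation_str[j] != "0":
--                 j += 1
--             out.append(notation_str[i:j])
--             i = j
--     return out
-- ===== Notes on version B (the rewrite author's own statement) =====
-- stated objective: alternative
-- what changed: Replaces A's stateful character fold with a cache accumulator and final flush by an index-based tokenizer that emits '0' or jumps to the next zero and slices out the whole non-zero run in one step.
import Mathlib
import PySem

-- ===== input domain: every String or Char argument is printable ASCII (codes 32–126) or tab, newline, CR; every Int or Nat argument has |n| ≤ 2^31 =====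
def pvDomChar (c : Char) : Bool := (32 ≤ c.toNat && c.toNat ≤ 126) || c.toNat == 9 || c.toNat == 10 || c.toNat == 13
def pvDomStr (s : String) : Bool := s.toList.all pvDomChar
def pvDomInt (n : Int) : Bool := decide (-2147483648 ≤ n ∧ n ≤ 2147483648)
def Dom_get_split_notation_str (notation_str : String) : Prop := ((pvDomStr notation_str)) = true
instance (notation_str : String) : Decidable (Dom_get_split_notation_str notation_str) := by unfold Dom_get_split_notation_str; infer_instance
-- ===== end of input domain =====

-- B replaces A's stateful fold-with-cache by a tokenizer (emit "0", or take the maximal non-zero run); return values proved equal.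

-- ===== PORT A =====
-- Strings are handled as their character lists (exact: Python iterates a str character by
-- character; the cache string is the list of accumulated characters, '+=' is list append).
def pvStepA (st : List String × List Char) (c : Char) : List String × List Char :=
  if c = '0' then
    (if st.2 ≠ [] then st.1 ++ [String.mk st.2] ++ [String.mk [c]] else st.1 ++ [String.mk [c]], [])
  else (st.1, st.2 ++ [c])

-- the final 'if cache_str != "": append' of A
def pvFlushA (st : List String × List Char) : List String :=
  if st.2 ≠ [] then st.1 ++ [String.mk st.2] else st.1

def get_split_notation_str (notation_str : String) : List String :=
  pvFlushA (notation_str.toList.foldl pvStepA ([], []))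

-- ===== PORT B =====
-- Tokenizer: at a '0' emit "0" and continue; otherwise the token is the maximal run of
-- non-zero characters (the inner scan to the next zero), and continue after it.
def pvTok : List Char → List String
  | [] => []
  | c :: cs =>
    if c = '0' then "0" :: pvTok cs
    else String.mk (c :: cs.takeWhile (· ≠ '0')) :: pvTok (cs.dropWhile (· ≠ '0'))
termination_by cs => cs.length
decreasing_by
  · simp
  · simpa using Nat.lt_succ_of_le (List.length_dropWhile_le _ _)

def get_split_notation_str_alt (notation_str : String) : List String :=
  pvTok notation_str.toList

-- ===== PRECONDITION & SPEC =====
def Spec_get_split_notation_str (notation_str : String) (out : List String) : Prop := out = get_split_notation_str_alt notation_str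
instance (notation_str : String) (out : List String) : Decidable (Spec_get_split_notation_str notation_str out) := by unfold Spec_get_split_notation_str; infer_instance

-- ===== CLAIM (what is proved, stated in full; the proofs are below) =====
def Claim_equal_get_split_notation_str : Prop := ∀ (notation_str : String), Dom_get_split_notation_str notation_str → Spec_get_split_notation_str notation_str (get_split_notation_str notation_str)

-- ===== LEMMAS AND PROOFS =====

theorem pvStepA_acc (acc : List String) (cache : List Char) (c : Char) :
    pvStepA (acc, cache) c = (acc ++ (pvStepA ([], cache) c).1, (pvStepA ([], cache) c).2) := by
  simp only [pvStepA]; split_ifs <;> simp_all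

-- A's accumulator is only ever appended to.
theorem pvFlushA_acc (acc st1 : List String) (st2 : List Char) :
    pvFlushA (acc ++ st1, st2) = acc ++ pvFlushA (st1, st2) := by
  simp only [pvFlushA]; split_ifs <;> simp

theorem pvFoldA_acc (cs : List Char) (acc : List String) (cache : List Char) :
    cs.foldl pvStepA (acc, cache) =
      (acc ++ (cs.foldl pvStepA ([], cache)).1, (cs.foldl pvStepA ([], cache)).2) := by
  induction cs generalizing acc cache with
  | nil => simp
  | cons c cs ih =>
    rw [List.foldl_cons, List.foldl_cons, pvStepA_acc acc cache c]
    conv_rhs => rw [← Prod.mk.eta (p := pvStepA ([], cache) c)]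
    rw [ih (acc ++ (pvStepA ([], cache) c).1) (pvStepA ([], cache) c).2,
        ih (pvStepA ([], cache) c).1 (pvStepA ([], cache) c).2]
    simp

-- A's fold from an arbitrary pending cache, flushed at the end, is B's tokenizer with the
-- cache glued onto the first non-zero run.
theorem pvFoldA_tok (cs : List Char) (cache : List Char) :
    pvFlushA (cs.foldl pvStepA ([], cache)) =
      (if cache = [] then pvTok cs
       else String.mk (cache ++ cs.takeWhile (· ≠ '0')) :: pvTok (cs.dropWhile (· ≠ '0'))) := by
  induction cs generalizing cache with
  | nil => by_cases hc : cache = [] <;> simp [hc, pvTok, pvFlushA]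
  | cons c cs ih =>
    rw [List.foldl_cons]
    by_cases h : c = '0'
    · subst h
      have h0 := ih ([] : List Char)
      rw [if_pos rfl] at h0
      by_cases hc : cache = []
      · rw [show pvStepA ([], cache) '0' = (["0"], []) from by simp [pvStepA, hc]; rfl]
        rw [pvFoldA_acc cs ["0"] [], pvFlushA_acc, h0]
        simp [pvTok, hc]
      · rw [show pvStepA ([], cache) '0' = ([String.mk cache, "0"], []) from by
              simp [pvStepA, hc]; rfl]
        rw [pvFoldA_acc cs [String.mk cache, "0"] [], pvFlushA_acc, h0]
        simp [pvTok, hc]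
    · rw [show pvStepA ([], cache) c = ([], cache ++ [c]) from by simp [pvStepA, h]]
      rw [ih (cache ++ [c])]
      by_cases hc : cache = [] <;>
        simp [hc, pvTok, h, List.takeWhile, List.dropWhile]

-- ===== VERDICT (by name: the statement is the Claim_ definition above) =====
theorem get_split_notation_str_spec : Claim_equal_get_split_notation_str := by
  intro s _
  unfold Spec_get_split_notation_str get_split_notation_str get_split_notation_str_alt
  simpa using pvFoldA_tok s.toList []
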